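-- pv_equiv track=rewrite | github.com/erin-koen/Whiteboard-Pairing | CountingVotes/model_solution/solution.py | counting_votes
-- ===== SOURCE A (Python) =====
-- def counting_votes(arr):
--     vote_dict = {}
--     for name in arr:
--         if name not in vote_dict:
--             vote_dict[name] = 1
--         else:
--             vote_dict[name] = vote_dict[name] + 1
--
--     count = 0
--     winners = []
--
--     # figure out the largest number of votes
--     for value in vote_dict.values():
--         if value > count:
--             count = value
--     # find the name(s) of the people who got that many votes
--     for key in vote_dict.keys():
--         if vote_dict[key] == count:
--             winners.append(key)
--
--     return sorted(winners, reverse=True)[0]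
-- ===== SOURCE B (Python) =====
-- def counting_votes(arr):
--     counts = {}
--     for name in arr:
--         counts[name] = counts.get(name, 0) + 1
--     return max(counts.items(), key=lambda kv: (kv[1], kv[0]))[0]
-- ===== Notes on version B (the rewrite author's own statement) =====
-- stated objective: simpler
-- what changed: A's three post-count passes (running-max over values, filter of winners, reverse sort + index) are replaced by a single max() over the dict items with the composite key (count, name); Pre_ excludes the empty list, on which A raises IndexError and B raises ValueError.
import Mathlib
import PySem

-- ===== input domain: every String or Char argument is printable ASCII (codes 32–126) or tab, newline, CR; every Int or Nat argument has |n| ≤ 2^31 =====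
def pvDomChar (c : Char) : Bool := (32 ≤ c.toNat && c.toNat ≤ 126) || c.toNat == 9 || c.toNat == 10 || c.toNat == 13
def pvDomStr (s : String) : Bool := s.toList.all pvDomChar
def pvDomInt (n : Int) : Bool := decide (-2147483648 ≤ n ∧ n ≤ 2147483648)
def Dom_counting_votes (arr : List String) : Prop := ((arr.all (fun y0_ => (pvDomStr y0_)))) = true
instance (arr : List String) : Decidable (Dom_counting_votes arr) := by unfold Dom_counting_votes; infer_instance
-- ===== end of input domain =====

-- B replaces A's three post-count passes (running-max over values, winners filter, reverse sort + index)
-- by one max() over the dict items with composite key (count, name); objective: simpler.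


-- ===== PORT A =====
def counting_votes (arr : List String) : String :=
  let vote_dict := arr.foldl
    (fun d name =>
      if !(d.contains name) then d.insert name 1
      else d.insert name (d.getD name 0 + 1)) (PySem.Dict.empty : PySem.Dict String Int)
  let count := vote_dict.values.foldl (fun c v => if v > c then v else c) (0 : Int)
  let winners := vote_dict.keys.foldl
    (fun ws k => if vote_dict.getD k 0 == count then ws ++ [k] else ws) ([] : List String)
  -- sorted(winners, reverse=True)[0]: IndexError on empty arr (winners = []), excluded by Pre_
  ((PySem.List.pyGet? (PySem.List.sorted winners (fun x => x) true) 0).getD "")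

-- ===== PORT B =====
def counting_votes_alt (arr : List String) : String :=
  let counts := arr.foldl
    (fun d name => d.insert name (d.getD name 0 + 1)) (PySem.Dict.empty : PySem.Dict String Int)
  -- max(counts.items(), key=lambda kv: (kv[1], kv[0]))[0], ported step for step as a fold keeping
  -- the first lexicographically-maximal item, with Python's tuple comparison written out
  -- ((c1,n1) < (c2,n2) iff c1 < c2 or (c1 == c2 and n1 < n2)); exact on the stated domain.
  -- ValueError on empty arr (fold result none), excluded by Pre_
  (((counts.items.foldl
      (fun acc x =>
        match acc with
        | none => some x
        | some mm => if mm.2 < x.2 ∨ (mm.2 = x.2 ∧ mm.1 < x.1) then some x else some mm)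
      none).map Prod.fst).getD "")

-- ===== PRECONDITION & SPEC =====
-- Pre_ excludes only the empty list: there A raises IndexError (and B raises ValueError).
def Pre_counting_votes (arr : List String) : Prop := arr ≠ []
instance (arr : List String) : Decidable (Pre_counting_votes arr) := by unfold Pre_counting_votes; infer_instance
def pvWitness_counting_votes : List String := (["a", "b", "a"])
def Spec_counting_votes (arr : List String) (out : String) : Prop := out = counting_votes_alt arr
instance (arr : List String) (out : String) : Decidable (Spec_counting_votes arr out) := by unfold Spec_counting_votes; infer_instance

-- ===== CLAIM (what is proved, stated in full; the proofs are below) =====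
def Claim_equal_counting_votes : Prop := ∀ (arr : List String), Dom_counting_votes arr → Pre_counting_votes arr → Spec_counting_votes arr (counting_votes arr)

-- ===== LEMMAS AND PROOFS =====

-- lexicographic (count, name) order used by B's max
def pvLexLE (y z : String × Int) : Prop := y.2 < z.2 ∨ (y.2 = z.2 ∧ y.1 ≤ z.1)

theorem pvLexLE_refl (y : String × Int) : pvLexLE y y := Or.inr ⟨rfl, le_refl _⟩

theorem pvLexLE_trans {a b c : String × Int} (h1 : pvLexLE a b) (h2 : pvLexLE b c) : pvLexLE a c := by
  rcases h1 with h1 | ⟨e1, l1⟩ <;> rcases h2 with h2 | ⟨e2, l2⟩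
  · exact Or.inl (lt_trans h1 h2)
  · exact Or.inl (e2 ▸ h1)
  · exact Or.inl (e1 ▸ h2)
  · exact Or.inr ⟨e1.trans e2, le_trans l1 l2⟩

-- invariant of the fold inside B's max over items with composite key (count, name)
theorem pvMaxFold_spec (t : List (String × Int)) : ∀ (m : String × Int),
    ∃ z, t.foldl
      (fun acc x =>
        match acc with
        | none => some x
        | some mm => if mm.2 < x.2 ∨ (mm.2 = x.2 ∧ mm.1 < x.1) then some x else some mm)
      (some m) = some z ∧ (z = m ∨ z ∈ t) ∧ pvLexLE m z ∧ ∀ y ∈ t, pvLexLE y z := by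
  induction t with
  | nil => intro m; exact ⟨m, rfl, Or.inl rfl, pvLexLE_refl m, by simp⟩
  | cons x t ih =>
    intro m
    by_cases h : m.2 < x.2 ∨ (m.2 = x.2 ∧ m.1 < x.1)
    · obtain ⟨z, hz, hmem, hle, hall⟩ := ih x
      have hmx : pvLexLE m x := by
        rcases h with h | ⟨h1, h2⟩
        · exact Or.inl h
        · exact Or.inr ⟨h1, le_of_lt h2⟩
      refine ⟨z, ?_, ?_, pvLexLE_trans hmx hle, ?_⟩
      · rw [List.foldl_cons]
        show List.foldl _ (if m.2 < x.2 ∨ (m.2 = x.2 ∧ m.1 < x.1) then some x else some m) t = some z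
        rw [if_pos h]; exact hz
      · rcases hmem with rfl | hm
        · exact Or.inr (List.mem_cons_self)
        · exact Or.inr (List.mem_cons_of_mem _ hm)
      · intro y hy
        rcases List.mem_cons.mp hy with rfl | hy
        · exact pvLexLE_trans (pvLexLE_refl y) hle
        · exact hall y hy
    · obtain ⟨z, hz, hmem, hle, hall⟩ := ih m
      have hxm : pvLexLE x m := by
        obtain ⟨h1, h3⟩ := not_or.mp h
        by_cases hlt : x.2 < m.2
        · exact Or.inl hlt
        · have he : x.2 = m.2 := le_antisymm (not_lt.mp h1) (not_lt.mp hlt)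
          exact Or.inr ⟨he, not_lt.mp (not_and.mp h3 he.symm)⟩
      refine ⟨z, ?_, ?_, hle, ?_⟩
      · rw [List.foldl_cons]
        show List.foldl _ (if m.2 < x.2 ∨ (m.2 = x.2 ∧ m.1 < x.1) then some x else some m) t = some z
        rw [if_neg h]; exact hz
      · rcases hmem with rfl | hm
        · exact Or.inl rfl
        · exact Or.inr (List.mem_cons_of_mem _ hm)
      · intro y hy
        rcases List.mem_cons.mp hy with rfl | hy
        · exact pvLexLE_trans hxm hle
        · exact hall y hy

-- A's counting loop builds Counter(arr)
theorem pvDictA_eq_counter (arr : List String) :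
    arr.foldl
      (fun d name =>
        if !(d.contains name) then d.insert name 1
        else d.insert name (d.getD name 0 + 1)) (PySem.Dict.empty : PySem.Dict String Int)
    = PySem.Dict.counter arr := by
  rw [PySem.List.foldl_congr_mem arr
    (g := fun (d : PySem.Dict String Int) name => d.insert name (d.getD name 0 + 1))]
  · exact PySem.Dict.foldl_insert_getD_add_one_eq_counter arr
  · intro acc x _
    by_cases h : acc.contains x
    · simp [h]
    · have h' : acc.contains x = false := by simpa using h
      have : acc.getD x 0 = 0 := PySem.Dict.getD_of_not_contains acc 0 h'
      simp [h', this]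

theorem counting_votes_eq_alt (arr : List String) (hne : arr ≠ []) :
    counting_votes arr = counting_votes_alt arr := by
  simp only [counting_votes, counting_votes_alt]
  rw [pvDictA_eq_counter arr, PySem.Dict.foldl_insert_getD_add_one_eq_counter arr]
  set dd := PySem.Dict.counter arr with hdef
  have hmax : dd.values.foldl (fun c v => if v > c then v else c) (0 : Int)
      = dd.values.foldl max (0 : Int) := by
    refine PySem.List.foldl_congr_mem _ _ _ _ ?_
    intro acc x _
    rcases lt_or_ge acc x with h | h
    · simp [gt_iff_lt, h, max_eq_right h.le]
    · simp [gt_iff_lt, not_lt.mpr h, max_eq_left h]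
  rw [hmax]
  set m := List.foldl max (0 : Int) dd.values with hm
  rw [PySem.List.foldl_append_if_eq_filter, List.nil_append]
  set W := List.filter (fun k => dd.getD k 0 == m) dd.keys with hWdef
  -- basic facts about the counter dict
  have hitems : dd.items = (PySem.Set.ofList arr).map (fun k => (k, (List.count k arr : Int))) := by
    rw [hdef]; exact PySem.Dict.items_counter arr
  have hvals : dd.values = dd.items.map Prod.snd := rfl
  have hkeys : dd.keys = dd.items.map Prod.fst := rfl
  have hnodup : dd.keys.Nodup := by rw [hdef]; exact PySem.Dict.nodup_keys_counter arr
  have hSne : PySem.Set.ofList arr ≠ [] := by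
    intro hS
    cases arr with
    | nil => exact hne rfl
    | cons a t =>
      have ha : a ∈ PySem.Set.ofList (a :: t) := (PySem.Set.mem_ofList _ _).mpr (List.mem_cons_self)
      rw [hS] at ha
      exact List.not_mem_nil ha
  have hitemsne : dd.items ≠ [] := by
    rw [hitems]
    simpa [List.map_eq_nil_iff] using hSne
  have hle : ∀ y ∈ dd.items, y.2 ≤ m := by
    intro y hy
    rw [hm]
    refine (PySem.List.le_foldl_max dd.values 0).2 y.2 ?_
    rw [hvals]
    exact List.mem_map.mpr ⟨y, hy, rfl⟩
  have hpos : ∀ y ∈ dd.items, (1 : Int) ≤ y.2 := by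
    intro y hy
    rw [hitems] at hy
    obtain ⟨k, hk, rfl⟩ := List.mem_map.mp hy
    have hkin : k ∈ arr := (PySem.Set.mem_ofList arr k).mp hk
    have hcnt : 0 < List.count k arr := List.count_pos_iff.mpr hkin
    have h1 : (1 : Int) ≤ (List.count k arr : Int) := by exact_mod_cast hcnt
    simpa using h1
  -- a witness item of maximal count
  have hmmem : ∃ p ∈ dd.items, p.2 = m := by
    rcases PySem.List.foldl_max_mem dd.values 0 with h0 | h
    · exfalso
      obtain ⟨p, hp⟩ := List.exists_mem_of_ne_nil dd.items hitemsne
      have h1 := hle p hp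
      have h2 := hpos p hp
      have hm0 : m = 0 := by rw [hm]; exact h0
      omega
    · rw [hvals] at h
      obtain ⟨p, hp, h2⟩ := List.mem_map.mp h
      exact ⟨p, hp, h2⟩
  -- B's maximum element z
  obtain ⟨q, rest, hI⟩ : ∃ q rest, dd.items = q :: rest := by
    cases h : dd.items with
    | nil => exact absurd h hitemsne
    | cons a l => exact ⟨a, l, rfl⟩
  have hmaxB : dd.items.foldl
      (fun acc x =>
        match acc with
        | none => some x
        | some mm => if mm.2 < x.2 ∨ (mm.2 = x.2 ∧ mm.1 < x.1) then some x else some mm)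
      none
      = List.foldl
          (fun acc x =>
            match acc with
            | none => some x
            | some mm => if mm.2 < x.2 ∨ (mm.2 = x.2 ∧ mm.1 < x.1) then some x else some mm)
          (some q) rest := by
    rw [hI]; rfl
  obtain ⟨z, hz, hzmem, hqz, hzall⟩ := pvMaxFold_spec rest q
  have hzitems : z ∈ dd.items := by
    rw [hI]
    rcases hzmem with rfl | h
    · exact List.mem_cons_self
    · exact List.mem_cons_of_mem _ h
  have hzall' : ∀ y ∈ dd.items, pvLexLE y z := by
    intro y hy
    rw [hI] at hy
    rcases List.mem_cons.mp hy with rfl | hy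
    · exact hqz
    · exact hzall y hy
  have hz2 : z.2 = m := by
    obtain ⟨p, hp, hp2⟩ := hmmem
    have h1 : z.2 ≤ m := hle z hzitems
    rcases hzall' p hp with h | ⟨h, _⟩ <;> omega
  have hz' : (z.1, z.2) ∈ dd.items := by simpa using hzitems
  have hgz : dd.getD z.1 0 = z.2 := PySem.Dict.getD_of_mem_items dd hz' hnodup 0
  have hzW : z.1 ∈ W := by
    rw [hWdef]
    refine List.mem_filter.mpr ⟨?_, ?_⟩
    · rw [hkeys]; exact List.mem_map.mpr ⟨z, hzitems, rfl⟩
    · simp [hgz, hz2]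
  have hWne : W ≠ [] := List.ne_nil_of_mem hzW
  -- A's winner w0
  obtain ⟨w0, t, hS⟩ : ∃ w0 t, PySem.List.sorted W (fun x => x) true = w0 :: t := by
    cases h : PySem.List.sorted W (fun x => x) true with
    | nil => exact absurd ((PySem.List.sorted_eq_nil_iff _ _ _).mp h) hWne
    | cons a l => exact ⟨a, l, rfl⟩
  have hw0W : w0 ∈ W := by
    have hmem : w0 ∈ PySem.List.sorted W (fun x => x) true := by
      rw [hS]; exact List.mem_cons_self
    exact (PySem.List.mem_sorted _ _ _ _).mp hmem
  have hge := PySem.List.key_head_sorted_rev_ge W (fun x => x) hS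
  have h1 : z.1 ≤ w0 := hge z.1 hzW
  have h2 : w0 ≤ z.1 := by
    rw [hWdef] at hw0W
    obtain ⟨hk, hv⟩ := List.mem_filter.mp hw0W
    simp only [beq_iff_eq] at hv
    rw [hkeys] at hk
    obtain ⟨p', hp', hp'1⟩ := List.mem_map.mp hk
    have hp'' : (w0, p'.2) ∈ dd.items := by rw [← hp'1]; simpa using hp'
    have hgd : dd.getD w0 0 = p'.2 := PySem.Dict.getD_of_mem_items dd hp'' hnodup 0
    have hp'2 : p'.2 = m := by rw [← hgd]; exact hv
    have hlex : pvLexLE (w0, m) z := by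
      apply hzall'
      rw [← hp'2]
      exact hp''
    rcases hlex with h | ⟨_, h⟩
    · exfalso; simp only [] at h; omega
    · exact h
  have hwz : w0 = z.1 := le_antisymm h2 h1
  rw [hS, PySem.List.pyGet?_zero_cons, hmaxB, hz]
  simp [hwz]

-- ===== VERDICT (by name: the statement is the Claim_ definition above) =====
theorem counting_votes_spec : Claim_equal_counting_votes := by
  intro arr _ hpre
  unfold Spec_counting_votes
  exact counting_votes_eq_alt arr hpre
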